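-- pv_equiv track=rewrite | github.com/tas12740/Bracket-Project | sportsrefdata/sportsrefcleaner.py | is_playerdata
-- ===== SOURCE A (Python) =====
-- def is_match(row, keys, keys_match):
--     for key in keys_match:
--         if key not in keys:
--             return False
--     return len(keys) == len(keys_match)
--
-- def is_playerdata(row):
--     keys = list(row.keys())
--     keys_matches = []
--     keys_matches.append(['school_name', 'conf_abbr', 'g', 'gs', 'mp_per_g', 'fg_per_g', 'fga_per_g', 'fg_pct', 'fg2_per_g', 'fg2a_per_g', 'fg2_pct', 'fg3_per_g', 'fg3a_per_g', 'ft_per_g', 'fta_per_g', 'ft_pct', 'orb_per_g', 'drb_per_g', 'trb_per_g', 'ast_per_g', 'stl_per_g', 'blk_per_g', 'tov_per_g', 'pf_per_g', 'pts_per_g', 'sos', 'season', 'type', 'player'])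
--     keys_matches.append(['school_name', 'conf_abbr', 'g', 'gs', 'mp_per_g', 'fg_per_g', 'fga_per_g', 'fg2_per_g', 'fg2a_per_g', 'fg3_per_g', 'fg3a_per_g', 'ft_per_g', 'fta_per_g', 'orb_per_g', 'drb_per_g', 'trb_per_g', 'ast_per_g', 'stl_per_g', 'blk_per_g', 'tov_per_g', 'pf_per_g', 'pts_per_g', 'sos', 'season', 'type', 'player'])
--     keys_matches.append(['player', 'schools', 'years', 'g', 'gs', 'mp', 'fg', 'fga', 'fg_pct', 'fg3', 'fg3a', 'fg3_pct', 'ft', 'fta', 'ft_pct', 'orb', 'trb', 'ast', 'stl', 'blk', 'tov', 'pf', 'pts', 'trb_per_g', 'ast_per_g', 'pts_per_g', 'efg_pct', 'ws', 'season', 'type'])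
--     keys_matches.append(['player', 'schools', 'years', 'g', 'gs', 'mp', 'fg', 'fga', 'fg_pct', 'fg3', 'fg3a', 'ft', 'fta', 'ft_pct', 'orb', 'trb', 'ast', 'stl', 'blk', 'tov', 'pf', 'pts', 'trb_per_g', 'ast_per_g', 'pts_per_g', 'efg_pct', 'ws', 'season', 'type'])
--     keys_matches.append(['school_name', 'conf_abbr', 'g', 'gs', 'fg_per_g', 'fga_per_g', 'fg_pct', 'fg2_per_g', 'fg2a_per_g', 'fg2_pct', 'fg3_per_g', 'fg3a_per_g', 'ft_per_g', 'fta_per_g', 'orb_per_g', 'drb_per_g', 'trb_per_g', 'ast_per_g', 'stl_per_g', 'blk_per_g', 'tov_per_g', 'pf_per_g', 'pts_per_g', 'sos', 'season', 'type', 'player'])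
--     keys_matches.append(['school_name', 'conf_abbr', 'g', 'fg_per_g', 'fga_per_g', 'fg_pct', 'fg2_per_g', 'fg2a_per_g', 'fg2_pct', 'fg3_per_g', 'fg3a_per_g', 'fg3_pct', 'ft_per_g', 'fta_per_g', 'ft_pct', 'trb_per_g', 'ast_per_g', 'stl_per_g', 'blk_per_g', 'pts_per_g', 'sos', 'season', 'type', 'player'])
--     keys_matches.append(['school_name', 'conf_abbr', 'g', 'gs', 'mp_per_g', 'fg_per_g', 'fga_per_g', 'fg_pct', 'fg2_per_g', 'fg2a_per_g', 'fg2_pct', 'fg3_per_g', 'fg3a_per_g', 'ft_per_g', 'fta_per_g', 'ft_pct', 'orb_per_g', 'drb_per_g', 'trb_per_g', 'ast_per_g', 'stl_per_g', 'blk_per_g', 'tov_per_g', 'pf_per_g', 'pts_per_g', 'season', 'type', 'player'])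
--     keys_matches.append(['school_name', 'conf_abbr', 'g', 'fg_per_g', 'fga_per_g', 'fg_pct', 'fg2_per_g', 'fg2a_per_g', 'fg2_pct', 'fg3_per_g', 'fg3a_per_g', 'fg3_pct', 'ft_per_g', 'fta_per_g', 'trb_per_g', 'ast_per_g', 'stl_per_g', 'blk_per_g', 'pts_per_g', 'sos', 'season', 'type', 'player'])
--     keys_matches.append(['school_name', 'conf_abbr', 'g', 'gs', 'fg_per_g', 'fga_per_g', 'fg2_per_g', 'fg2a_per_g', 'fg3_per_g', 'fg3a_per_g', 'ft_per_g', 'fta_per_g', 'orb_per_g', 'drb_per_g', 'trb_per_g', 'ast_per_g', 'stl_per_g', 'blk_per_g', 'tov_per_g', 'pf_per_g', 'pts_per_g', 'sos', 'season', 'type', 'player'])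
--     keys_matches.append(['school_name', 'conf_abbr', 'g', 'mp_per_g', 'fg_per_g', 'fga_per_g', 'fg_pct', 'fg2_per_g', 'fg2a_per_g', 'fg2_pct', 'fg3_per_g', 'fg3a_per_g', 'ft_per_g', 'fta_per_g', 'ft_pct', 'trb_per_g', 'ast_per_g', 'stl_per_g', 'blk_per_g', 'tov_per_g', 'pf_per_g', 'pts_per_g', 'sos', 'season', 'type', 'player'])
--     keys_matches.append(['player', 'year', 'type', 'g', 'gs', 'mp_per_g', 'fg_per_g', 'fga_per_g', 'fg2_per_g', 'fg2a_per_g', 'fg3_per_g', 'fg3a_per_g', 'ft_per_g', 'fta_per_g', 'orb_per_g', 'drb_per_g', 'trb_per_g', 'ast_per_g', 'stl_per_g', 'blk_per_g', 'tov_per_g', 'pf_per_g', 'pts_per_g'])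
--     for poss in keys_matches:
--         res = is_match(row, keys, poss)
--         if res:
--             return True
--     return False
-- ===== SOURCE B (Python) =====
-- _SEP = '\x1f'
--
-- # Precomputed index: the canonical fingerprint (separator-joined sorted key list)
-- # of each accepted schema.  A row matches a schema iff its own fingerprint is here.
-- _SCHEMA_FINGERPRINTS = frozenset({
--     'ast_per_g\x1fblk_per_g\x1fconf_abbr\x1fdrb_per_g\x1ffg2_pct\x1ffg2_per_g\x1ffg2a_per_g\x1ffg3_per_g\x1ffg3a_per_g\x1ffg_pct\x1ffg_per_g\x1ffga_per_g\x1fft_pct\x1fft_per_g\x1ffta_per_g\x1fg\x1fgs\x1fmp_per_g\x1forb_per_g\x1fpf_per_g\x1fplayer\x1fpts_per_g\x1fschool_name\x1fseason\x1fsos\x1fstl_per_g\x1ftov_per_g\x1ftrb_per_g\x1ftype',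
--     'ast_per_g\x1fblk_per_g\x1fconf_abbr\x1fdrb_per_g\x1ffg2_per_g\x1ffg2a_per_g\x1ffg3_per_g\x1ffg3a_per_g\x1ffg_per_g\x1ffga_per_g\x1fft_per_g\x1ffta_per_g\x1fg\x1fgs\x1fmp_per_g\x1forb_per_g\x1fpf_per_g\x1fplayer\x1fpts_per_g\x1fschool_name\x1fseason\x1fsos\x1fstl_per_g\x1ftov_per_g\x1ftrb_per_g\x1ftype',
--     'ast\x1fast_per_g\x1fblk\x1fefg_pct\x1ffg\x1ffg3\x1ffg3_pct\x1ffg3a\x1ffg_pct\x1ffga\x1fft\x1fft_pct\x1ffta\x1fg\x1fgs\x1fmp\x1forb\x1fpf\x1fplayer\x1fpts\x1fpts_per_g\x1fschools\x1fseason\x1fstl\x1ftov\x1ftrb\x1ftrb_per_g\x1ftype\x1fws\x1fyears',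
--     'ast\x1fast_per_g\x1fblk\x1fefg_pct\x1ffg\x1ffg3\x1ffg3a\x1ffg_pct\x1ffga\x1fft\x1fft_pct\x1ffta\x1fg\x1fgs\x1fmp\x1forb\x1fpf\x1fplayer\x1fpts\x1fpts_per_g\x1fschools\x1fseason\x1fstl\x1ftov\x1ftrb\x1ftrb_per_g\x1ftype\x1fws\x1fyears',
--     'ast_per_g\x1fblk_per_g\x1fconf_abbr\x1fdrb_per_g\x1ffg2_pct\x1ffg2_per_g\x1ffg2a_per_g\x1ffg3_per_g\x1ffg3a_per_g\x1ffg_pct\x1ffg_per_g\x1ffga_per_g\x1fft_per_g\x1ffta_per_g\x1fg\x1fgs\x1forb_per_g\x1fpf_per_g\x1fplayer\x1fpts_per_g\x1fschool_name\x1fseason\x1fsos\x1fstl_per_g\x1ftov_per_g\x1ftrb_per_g\x1ftype',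
--     'ast_per_g\x1fblk_per_g\x1fconf_abbr\x1ffg2_pct\x1ffg2_per_g\x1ffg2a_per_g\x1ffg3_pct\x1ffg3_per_g\x1ffg3a_per_g\x1ffg_pct\x1ffg_per_g\x1ffga_per_g\x1fft_pct\x1fft_per_g\x1ffta_per_g\x1fg\x1fplayer\x1fpts_per_g\x1fschool_name\x1fseason\x1fsos\x1fstl_per_g\x1ftrb_per_g\x1ftype',
--     'ast_per_g\x1fblk_per_g\x1fconf_abbr\x1fdrb_per_g\x1ffg2_pct\x1ffg2_per_g\x1ffg2a_per_g\x1ffg3_per_g\x1ffg3a_per_g\x1ffg_pct\x1ffg_per_g\x1ffga_per_g\x1fft_pct\x1fft_per_g\x1ffta_per_g\x1fg\x1fgs\x1fmp_per_g\x1forb_per_g\x1fpf_per_g\x1fplayer\x1fpts_per_g\x1fschool_name\x1fseason\x1fstl_per_g\x1ftov_per_g\x1ftrb_per_g\x1ftype',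
--     'ast_per_g\x1fblk_per_g\x1fconf_abbr\x1ffg2_pct\x1ffg2_per_g\x1ffg2a_per_g\x1ffg3_pct\x1ffg3_per_g\x1ffg3a_per_g\x1ffg_pct\x1ffg_per_g\x1ffga_per_g\x1fft_per_g\x1ffta_per_g\x1fg\x1fplayer\x1fpts_per_g\x1fschool_name\x1fseason\x1fsos\x1fstl_per_g\x1ftrb_per_g\x1ftype',
--     'ast_per_g\x1fblk_per_g\x1fconf_abbr\x1fdrb_per_g\x1ffg2_per_g\x1ffg2a_per_g\x1ffg3_per_g\x1ffg3a_per_g\x1ffg_per_g\x1ffga_per_g\x1fft_per_g\x1ffta_per_g\x1fg\x1fgs\x1forb_per_g\x1fpf_per_g\x1fplayer\x1fpts_per_g\x1fschool_name\x1fseason\x1fsos\x1fstl_per_g\x1ftov_per_g\x1ftrb_per_g\x1ftype',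
--     'ast_per_g\x1fblk_per_g\x1fconf_abbr\x1ffg2_pct\x1ffg2_per_g\x1ffg2a_per_g\x1ffg3_per_g\x1ffg3a_per_g\x1ffg_pct\x1ffg_per_g\x1ffga_per_g\x1fft_pct\x1fft_per_g\x1ffta_per_g\x1fg\x1fmp_per_g\x1fpf_per_g\x1fplayer\x1fpts_per_g\x1fschool_name\x1fseason\x1fsos\x1fstl_per_g\x1ftov_per_g\x1ftrb_per_g\x1ftype',
--     'ast_per_g\x1fblk_per_g\x1fdrb_per_g\x1ffg2_per_g\x1ffg2a_per_g\x1ffg3_per_g\x1ffg3a_per_g\x1ffg_per_g\x1ffga_per_g\x1fft_per_g\x1ffta_per_g\x1fg\x1fgs\x1fmp_per_g\x1forb_per_g\x1fpf_per_g\x1fplayer\x1fpts_per_g\x1fstl_per_g\x1ftov_per_g\x1ftrb_per_g\x1ftype\x1fyear',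
-- })
--
--
-- def is_playerdata(row):
--     return _SEP.join(sorted(row.keys())) in _SCHEMA_FINGERPRINTS
-- ===== Notes on version B (the rewrite author's own statement) =====
-- stated objective: simpler
-- what changed: Replaces the per-candidate membership-and-length scans over 11 schema lists with a single lookup: the row's canonical fingerprint (its sorted keys joined by a '\x1f' separator, which no schema key contains) is tested once against a precomputed frozenset of the 11 schema fingerprints.
import Mathlib
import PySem

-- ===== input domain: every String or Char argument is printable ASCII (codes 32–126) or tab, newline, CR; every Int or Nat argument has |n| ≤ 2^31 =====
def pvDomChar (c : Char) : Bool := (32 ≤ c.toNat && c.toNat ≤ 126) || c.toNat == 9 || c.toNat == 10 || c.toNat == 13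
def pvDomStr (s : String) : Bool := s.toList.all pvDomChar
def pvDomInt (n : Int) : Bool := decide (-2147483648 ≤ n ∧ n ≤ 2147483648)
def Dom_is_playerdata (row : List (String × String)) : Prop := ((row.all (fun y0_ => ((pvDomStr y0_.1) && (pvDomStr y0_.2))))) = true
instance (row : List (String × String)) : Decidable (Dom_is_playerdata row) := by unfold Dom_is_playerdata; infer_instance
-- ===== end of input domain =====

-- B replaces A's per-schema membership-and-length scans by one lookup of the row's
-- sorted-key fingerprint in a precomputed index (objective: simpler).

-- ===== PORT A =====
-- the 11 schema key lists A appends to keys_matches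
def pvSchemas : List (List String) :=
  [["school_name", "conf_abbr", "g", "gs", "mp_per_g", "fg_per_g", "fga_per_g", "fg_pct", "fg2_per_g", "fg2a_per_g", "fg2_pct", "fg3_per_g", "fg3a_per_g", "ft_per_g", "fta_per_g", "ft_pct", "orb_per_g", "drb_per_g", "trb_per_g", "ast_per_g", "stl_per_g", "blk_per_g", "tov_per_g", "pf_per_g", "pts_per_g", "sos", "season", "type", "player"],
   ["school_name", "conf_abbr", "g", "gs", "mp_per_g", "fg_per_g", "fga_per_g", "fg2_per_g", "fg2a_per_g", "fg3_per_g", "fg3a_per_g", "ft_per_g", "fta_per_g", "orb_per_g", "drb_per_g", "trb_per_g", "ast_per_g", "stl_per_g", "blk_per_g", "tov_per_g", "pf_per_g", "pts_per_g", "sos", "season", "type", "player"],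
   ["player", "schools", "years", "g", "gs", "mp", "fg", "fga", "fg_pct", "fg3", "fg3a", "fg3_pct", "ft", "fta", "ft_pct", "orb", "trb", "ast", "stl", "blk", "tov", "pf", "pts", "trb_per_g", "ast_per_g", "pts_per_g", "efg_pct", "ws", "season", "type"],
   ["player", "schools", "years", "g", "gs", "mp", "fg", "fga", "fg_pct", "fg3", "fg3a", "ft", "fta", "ft_pct", "orb", "trb", "ast", "stl", "blk", "tov", "pf", "pts", "trb_per_g", "ast_per_g", "pts_per_g", "efg_pct", "ws", "season", "type"],
   ["school_name", "conf_abbr", "g", "gs", "fg_per_g", "fga_per_g", "fg_pct", "fg2_per_g", "fg2a_per_g", "fg2_pct", "fg3_per_g", "fg3a_per_g", "ft_per_g", "fta_per_g", "orb_per_g", "drb_per_g", "trb_per_g", "ast_per_g", "stl_per_g", "blk_per_g", "tov_per_g", "pf_per_g", "pts_per_g", "sos", "season", "type", "player"],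
   ["school_name", "conf_abbr", "g", "fg_per_g", "fga_per_g", "fg_pct", "fg2_per_g", "fg2a_per_g", "fg2_pct", "fg3_per_g", "fg3a_per_g", "fg3_pct", "ft_per_g", "fta_per_g", "ft_pct", "trb_per_g", "ast_per_g", "stl_per_g", "blk_per_g", "pts_per_g", "sos", "season", "type", "player"],
   ["school_name", "conf_abbr", "g", "gs", "mp_per_g", "fg_per_g", "fga_per_g", "fg_pct", "fg2_per_g", "fg2a_per_g", "fg2_pct", "fg3_per_g", "fg3a_per_g", "ft_per_g", "fta_per_g", "ft_pct", "orb_per_g", "drb_per_g", "trb_per_g", "ast_per_g", "stl_per_g", "blk_per_g", "tov_per_g", "pf_per_g", "pts_per_g", "season", "type", "player"],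
   ["school_name", "conf_abbr", "g", "fg_per_g", "fga_per_g", "fg_pct", "fg2_per_g", "fg2a_per_g", "fg2_pct", "fg3_per_g", "fg3a_per_g", "fg3_pct", "ft_per_g", "fta_per_g", "trb_per_g", "ast_per_g", "stl_per_g", "blk_per_g", "pts_per_g", "sos", "season", "type", "player"],
   ["school_name", "conf_abbr", "g", "gs", "fg_per_g", "fga_per_g", "fg2_per_g", "fg2a_per_g", "fg3_per_g", "fg3a_per_g", "ft_per_g", "fta_per_g", "orb_per_g", "drb_per_g", "trb_per_g", "ast_per_g", "stl_per_g", "blk_per_g", "tov_per_g", "pf_per_g", "pts_per_g", "sos", "season", "type", "player"],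
   ["school_name", "conf_abbr", "g", "mp_per_g", "fg_per_g", "fga_per_g", "fg_pct", "fg2_per_g", "fg2a_per_g", "fg2_pct", "fg3_per_g", "fg3a_per_g", "ft_per_g", "fta_per_g", "ft_pct", "trb_per_g", "ast_per_g", "stl_per_g", "blk_per_g", "tov_per_g", "pf_per_g", "pts_per_g", "sos", "season", "type", "player"],
   ["player", "year", "type", "g", "gs", "mp_per_g", "fg_per_g", "fga_per_g", "fg2_per_g", "fg2a_per_g", "fg3_per_g", "fg3a_per_g", "ft_per_g", "fta_per_g", "orb_per_g", "drb_per_g", "trb_per_g", "ast_per_g", "stl_per_g", "blk_per_g", "tov_per_g", "pf_per_g", "pts_per_g"]]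

-- 'for key in keys_match: if key not in keys: return False', then 'return len(keys) == len(keys_match)'
def is_match_go (keys orig : List String) : List String → Bool
  | [] => keys.length == orig.length
  | key :: rest => if !(keys.contains key) then false else is_match_go keys orig rest

def is_match (_row : List (String × String)) (keys keysMatch : List String) : Bool :=
  is_match_go keys keysMatch keysMatch

def is_playerdata (row : List (String × String)) : Bool :=
  let keys := row.map Prod.fst
  let keysMatches := pvSchemas
  -- 'for poss in keys_matches: if is_match(...): return True' / 'return False'
  keysMatches.any (fun poss => is_match row keys poss)

-- ===== PORT B =====
-- _SEP = '\x1f'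
def pvSep : String := "\x1F"

-- _SCHEMA_FINGERPRINTS: the precomputed literal index from Source B
def pvFpList : List String :=
  ["ast_per_g\x1Fblk_per_g\x1Fconf_abbr\x1Fdrb_per_g\x1Ffg2_pct\x1Ffg2_per_g\x1Ffg2a_per_g\x1Ffg3_per_g\x1Ffg3a_per_g\x1Ffg_pct\x1Ffg_per_g\x1Ffga_per_g\x1Fft_pct\x1Fft_per_g\x1Ffta_per_g\x1Fg\x1Fgs\x1Fmp_per_g\x1Forb_per_g\x1Fpf_per_g\x1Fplayer\x1Fpts_per_g\x1Fschool_name\x1Fseason\x1Fsos\x1Fstl_per_g\x1Ftov_per_g\x1Ftrb_per_g\x1Ftype",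
   "ast_per_g\x1Fblk_per_g\x1Fconf_abbr\x1Fdrb_per_g\x1Ffg2_per_g\x1Ffg2a_per_g\x1Ffg3_per_g\x1Ffg3a_per_g\x1Ffg_per_g\x1Ffga_per_g\x1Fft_per_g\x1Ffta_per_g\x1Fg\x1Fgs\x1Fmp_per_g\x1Forb_per_g\x1Fpf_per_g\x1Fplayer\x1Fpts_per_g\x1Fschool_name\x1Fseason\x1Fsos\x1Fstl_per_g\x1Ftov_per_g\x1Ftrb_per_g\x1Ftype",
   "ast\x1Fast_per_g\x1Fblk\x1Fefg_pct\x1Ffg\x1Ffg3\x1Ffg3_pct\x1Ffg3a\x1Ffg_pct\x1Ffga\x1Fft\x1Fft_pct\x1Ffta\x1Fg\x1Fgs\x1Fmp\x1Forb\x1Fpf\x1Fplayer\x1Fpts\x1Fpts_per_g\x1Fschools\x1Fseason\x1Fstl\x1Ftov\x1Ftrb\x1Ftrb_per_g\x1Ftype\x1Fws\x1Fyears",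
   "ast\x1Fast_per_g\x1Fblk\x1Fefg_pct\x1Ffg\x1Ffg3\x1Ffg3a\x1Ffg_pct\x1Ffga\x1Fft\x1Fft_pct\x1Ffta\x1Fg\x1Fgs\x1Fmp\x1Forb\x1Fpf\x1Fplayer\x1Fpts\x1Fpts_per_g\x1Fschools\x1Fseason\x1Fstl\x1Ftov\x1Ftrb\x1Ftrb_per_g\x1Ftype\x1Fws\x1Fyears",
   "ast_per_g\x1Fblk_per_g\x1Fconf_abbr\x1Fdrb_per_g\x1Ffg2_pct\x1Ffg2_per_g\x1Ffg2a_per_g\x1Ffg3_per_g\x1Ffg3a_per_g\x1Ffg_pct\x1Ffg_per_g\x1Ffga_per_g\x1Fft_per_g\x1Ffta_per_g\x1Fg\x1Fgs\x1Forb_per_g\x1Fpf_per_g\x1Fplayer\x1Fpts_per_g\x1Fschool_name\x1Fseason\x1Fsos\x1Fstl_per_g\x1Ftov_per_g\x1Ftrb_per_g\x1Ftype",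
   "ast_per_g\x1Fblk_per_g\x1Fconf_abbr\x1Ffg2_pct\x1Ffg2_per_g\x1Ffg2a_per_g\x1Ffg3_pct\x1Ffg3_per_g\x1Ffg3a_per_g\x1Ffg_pct\x1Ffg_per_g\x1Ffga_per_g\x1Fft_pct\x1Fft_per_g\x1Ffta_per_g\x1Fg\x1Fplayer\x1Fpts_per_g\x1Fschool_name\x1Fseason\x1Fsos\x1Fstl_per_g\x1Ftrb_per_g\x1Ftype",
   "ast_per_g\x1Fblk_per_g\x1Fconf_abbr\x1Fdrb_per_g\x1Ffg2_pct\x1Ffg2_per_g\x1Ffg2a_per_g\x1Ffg3_per_g\x1Ffg3a_per_g\x1Ffg_pct\x1Ffg_per_g\x1Ffga_per_g\x1Fft_pct\x1Fft_per_g\x1Ffta_per_g\x1Fg\x1Fgs\x1Fmp_per_g\x1Forb_per_g\x1Fpf_per_g\x1Fplayer\x1Fpts_per_g\x1Fschool_name\x1Fseason\x1Fstl_per_g\x1Ftov_per_g\x1Ftrb_per_g\x1Ftype",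
   "ast_per_g\x1Fblk_per_g\x1Fconf_abbr\x1Ffg2_pct\x1Ffg2_per_g\x1Ffg2a_per_g\x1Ffg3_pct\x1Ffg3_per_g\x1Ffg3a_per_g\x1Ffg_pct\x1Ffg_per_g\x1Ffga_per_g\x1Fft_per_g\x1Ffta_per_g\x1Fg\x1Fplayer\x1Fpts_per_g\x1Fschool_name\x1Fseason\x1Fsos\x1Fstl_per_g\x1Ftrb_per_g\x1Ftype",
   "ast_per_g\x1Fblk_per_g\x1Fconf_abbr\x1Fdrb_per_g\x1Ffg2_per_g\x1Ffg2a_per_g\x1Ffg3_per_g\x1Ffg3a_per_g\x1Ffg_per_g\x1Ffga_per_g\x1Fft_per_g\x1Ffta_per_g\x1Fg\x1Fgs\x1Forb_per_g\x1Fpf_per_g\x1Fplayer\x1Fpts_per_g\x1Fschool_name\x1Fseason\x1Fsos\x1Fstl_per_g\x1Ftov_per_g\x1Ftrb_per_g\x1Ftype",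
   "ast_per_g\x1Fblk_per_g\x1Fconf_abbr\x1Ffg2_pct\x1Ffg2_per_g\x1Ffg2a_per_g\x1Ffg3_per_g\x1Ffg3a_per_g\x1Ffg_pct\x1Ffg_per_g\x1Ffga_per_g\x1Fft_pct\x1Fft_per_g\x1Ffta_per_g\x1Fg\x1Fmp_per_g\x1Fpf_per_g\x1Fplayer\x1Fpts_per_g\x1Fschool_name\x1Fseason\x1Fsos\x1Fstl_per_g\x1Ftov_per_g\x1Ftrb_per_g\x1Ftype",
   "ast_per_g\x1Fblk_per_g\x1Fdrb_per_g\x1Ffg2_per_g\x1Ffg2a_per_g\x1Ffg3_per_g\x1Ffg3a_per_g\x1Ffg_per_g\x1Ffga_per_g\x1Fft_per_g\x1Ffta_per_g\x1Fg\x1Fgs\x1Fmp_per_g\x1Forb_per_g\x1Fpf_per_g\x1Fplayer\x1Fpts_per_g\x1Fstl_per_g\x1Ftov_per_g\x1Ftrb_per_g\x1Ftype\x1Fyear"]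

def pvSchemaFingerprints : PySem.Set String := PySem.Set.ofList pvFpList

-- return _SEP.join(sorted(row.keys())) in _SCHEMA_FINGERPRINTS
def is_playerdata_alt (row : List (String × String)) : Bool :=
  PySem.Set.contains pvSchemaFingerprints
    (PySem.Str.join pvSep (PySem.List.sorted (row.map Prod.fst) (fun x => x) false))

-- ===== PRECONDITION & SPEC =====
def Spec_is_playerdata (row : List (String × String)) (out : Bool) : Prop := out = is_playerdata_alt row
instance (row : List (String × String)) (out : Bool) : Decidable (Spec_is_playerdata row out) := by unfold Spec_is_playerdata; infer_instance

-- ===== CLAIM (what is proved, stated in full; the proofs are below) =====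
def Claim_equal_is_playerdata : Prop := ∀ (row : List (String × String)), Dom_is_playerdata row → Spec_is_playerdata row (is_playerdata row)

-- ===== LEMMAS AND PROOFS =====

set_option maxRecDepth 100000 in
set_option maxHeartbeats 1000000 in
lemma pvSchemas_nodup : ∀ m ∈ pvSchemas, m.Nodup := by decide

-- every schema is nonempty and none of its keys contains the separator character
set_option maxRecDepth 100000 in
set_option maxHeartbeats 1000000 in
lemma pvSchemas_sep_free : ∀ m ∈ pvSchemas, m ≠ [] ∧ ∀ s ∈ m, ('\x1F' : Char) ∉ s.toList := by decide

-- each schema's keys in sorted order (named so 'sorted' never has to be evaluated by the kernel)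
def pvSortedSchemas : List (List String) :=
  [["ast_per_g", "blk_per_g", "conf_abbr", "drb_per_g", "fg2_pct", "fg2_per_g", "fg2a_per_g", "fg3_per_g", "fg3a_per_g", "fg_pct", "fg_per_g", "fga_per_g", "ft_pct", "ft_per_g", "fta_per_g", "g", "gs", "mp_per_g", "orb_per_g", "pf_per_g", "player", "pts_per_g", "school_name", "season", "sos", "stl_per_g", "tov_per_g", "trb_per_g", "type"],
   ["ast_per_g", "blk_per_g", "conf_abbr", "drb_per_g", "fg2_per_g", "fg2a_per_g", "fg3_per_g", "fg3a_per_g", "fg_per_g", "fga_per_g", "ft_per_g", "fta_per_g", "g", "gs", "mp_per_g", "orb_per_g", "pf_per_g", "player", "pts_per_g", "school_name", "season", "sos", "stl_per_g", "tov_per_g", "trb_per_g", "type"],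
   ["ast", "ast_per_g", "blk", "efg_pct", "fg", "fg3", "fg3_pct", "fg3a", "fg_pct", "fga", "ft", "ft_pct", "fta", "g", "gs", "mp", "orb", "pf", "player", "pts", "pts_per_g", "schools", "season", "stl", "tov", "trb", "trb_per_g", "type", "ws", "years"],
   ["ast", "ast_per_g", "blk", "efg_pct", "fg", "fg3", "fg3a", "fg_pct", "fga", "ft", "ft_pct", "fta", "g", "gs", "mp", "orb", "pf", "player", "pts", "pts_per_g", "schools", "season", "stl", "tov", "trb", "trb_per_g", "type", "ws", "years"],
   ["ast_per_g", "blk_per_g", "conf_abbr", "drb_per_g", "fg2_pct", "fg2_per_g", "fg2a_per_g", "fg3_per_g", "fg3a_per_g", "fg_pct", "fg_per_g", "fga_per_g", "ft_per_g", "fta_per_g", "g", "gs", "orb_per_g", "pf_per_g", "player", "pts_per_g", "school_name", "season", "sos", "stl_per_g", "tov_per_g", "trb_per_g", "type"],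
   ["ast_per_g", "blk_per_g", "conf_abbr", "fg2_pct", "fg2_per_g", "fg2a_per_g", "fg3_pct", "fg3_per_g", "fg3a_per_g", "fg_pct", "fg_per_g", "fga_per_g", "ft_pct", "ft_per_g", "fta_per_g", "g", "player", "pts_per_g", "school_name", "season", "sos", "stl_per_g", "trb_per_g", "type"],
   ["ast_per_g", "blk_per_g", "conf_abbr", "drb_per_g", "fg2_pct", "fg2_per_g", "fg2a_per_g", "fg3_per_g", "fg3a_per_g", "fg_pct", "fg_per_g", "fga_per_g", "ft_pct", "ft_per_g", "fta_per_g", "g", "gs", "mp_per_g", "orb_per_g", "pf_per_g", "player", "pts_per_g", "school_name", "season", "stl_per_g", "tov_per_g", "trb_per_g", "type"],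
   ["ast_per_g", "blk_per_g", "conf_abbr", "fg2_pct", "fg2_per_g", "fg2a_per_g", "fg3_pct", "fg3_per_g", "fg3a_per_g", "fg_pct", "fg_per_g", "fga_per_g", "ft_per_g", "fta_per_g", "g", "player", "pts_per_g", "school_name", "season", "sos", "stl_per_g", "trb_per_g", "type"],
   ["ast_per_g", "blk_per_g", "conf_abbr", "drb_per_g", "fg2_per_g", "fg2a_per_g", "fg3_per_g", "fg3a_per_g", "fg_per_g", "fga_per_g", "ft_per_g", "fta_per_g", "g", "gs", "orb_per_g", "pf_per_g", "player", "pts_per_g", "school_name", "season", "sos", "stl_per_g", "tov_per_g", "trb_per_g", "type"],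
   ["ast_per_g", "blk_per_g", "conf_abbr", "fg2_pct", "fg2_per_g", "fg2a_per_g", "fg3_per_g", "fg3a_per_g", "fg_pct", "fg_per_g", "fga_per_g", "ft_pct", "ft_per_g", "fta_per_g", "g", "mp_per_g", "pf_per_g", "player", "pts_per_g", "school_name", "season", "sos", "stl_per_g", "tov_per_g", "trb_per_g", "type"],
   ["ast_per_g", "blk_per_g", "drb_per_g", "fg2_per_g", "fg2a_per_g", "fg3_per_g", "fg3a_per_g", "fg_per_g", "fga_per_g", "ft_per_g", "fta_per_g", "g", "gs", "mp_per_g", "orb_per_g", "pf_per_g", "player", "pts_per_g", "stl_per_g", "tov_per_g", "trb_per_g", "type", "year"]]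

lemma map_sorted_eq : ∀ (L M : List (List String)), L.length = M.length →
    (∀ p ∈ L.zip M, p.2.Perm p.1 ∧ List.Pairwise (fun a b : String => a.toList < b.toList) p.2) →
    L.map (fun m => PySem.List.sorted m (fun x => x) false) = M := by
  intro L
  induction L with
  | nil =>
      intro M h _
      rw [List.length_nil] at h
      rw [List.map_nil, (List.length_eq_zero_iff.mp h.symm).symm]
  | cons x xs ih =>
      intro M hlen hz
      cases M with
      | nil => simp at hlen
      | cons y ys =>
          have h1 := hz (x, y) (by rw [List.zip_cons_cons]; exact List.mem_cons_self ..)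
          have hx : PySem.List.sorted x (fun s => s) false = y :=
            PySem.List.sorted_eq_of_perm_of_pairwise_lt x y (fun s => s) h1.1
              (h1.2.imp (fun h => String.lt_iff_toList_lt.mpr h))
          have ht := ih ys (by simpa using hlen)
            (fun p hp => hz p (by rw [List.zip_cons_cons]; exact List.mem_cons_of_mem _ hp))
          rw [List.map_cons, hx, ht]

set_option maxRecDepth 400000 in
set_option maxHeartbeats 4000000 in
lemma sorted_pvSchemas :
    pvSchemas.map (fun m => PySem.List.sorted m (fun x => x) false) = pvSortedSchemas :=
  map_sorted_eq pvSchemas pvSortedSchemas (by decide) (by decide)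

-- the literal index in the B port is exactly the fingerprint of each schema
set_option maxRecDepth 400000 in
set_option maxHeartbeats 4000000 in
lemma fp_map :
    pvSchemas.map (fun m => PySem.Str.join pvSep (PySem.List.sorted m (fun x => x) false))
      = pvFpList := by
  have : pvSchemas.map (fun m => PySem.Str.join pvSep (PySem.List.sorted m (fun x => x) false))
      = (pvSchemas.map (fun m => PySem.List.sorted m (fun x => x) false)).map
          (fun l => PySem.Str.join pvSep l) := by
    rw [List.map_map]; rfl
  rw [this, sorted_pvSchemas]
  decide

set_option maxRecDepth 100000 in
set_option maxHeartbeats 1000000 in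
lemma pvFp_toList_ne_nil : ∀ fp ∈ pvFpList, fp.toList ≠ [] := by decide

lemma is_match_go_eq (keys orig : List String) (l : List String) :
    is_match_go keys orig l = (l.all (fun k => keys.contains k) && (keys.length == orig.length)) := by
  induction l with
  | nil => simp [is_match_go]
  | cons k rest ih =>
      simp only [is_match_go, List.all_cons, ih, Bool.not_eq_true', List.contains_eq_mem]
      cases h : decide (k ∈ keys) <;> simp

lemma is_match_iff (row : List (String × String)) (keys m : List String) (hm : m.Nodup) :
    is_match row keys m = true ↔ keys.Perm m := by
  rw [is_match, is_match_go_eq]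
  simp only [Bool.and_eq_true, List.all_eq_true, List.contains_eq_mem, decide_eq_true_eq,
    beq_iff_eq]
  constructor
  · rintro ⟨hsub, hlen⟩
    have hsp : m.Subperm keys := hm.subperm (fun x hx => hsub x hx)
    exact (hsp.perm_of_length_le (le_of_eq hlen)).symm
  · intro hp
    exact ⟨fun x hx => hp.symm.subset hx, hp.length_eq⟩

-- a ++ c :: s = b ++ c :: t with c ∉ a, c ∉ b forces a = b and s = t (first occurrence of c)
lemma append_sep_inj (c : Char) :
    ∀ (a b s t : List Char), c ∉ a → c ∉ b → a ++ c :: s = b ++ c :: t → a = b ∧ s = t := by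
  intro a
  induction a with
  | nil =>
      intro b s t _ hb h
      cases b with
      | nil => simpa using h
      | cons hb' b' =>
          simp only [List.nil_append, List.cons_append, List.cons.injEq] at h
          exact absurd (h.1 ▸ List.mem_cons_self ..) (h.1 ▸ hb)
  | cons ha' a' ih =>
      intro b s t ha hb h
      cases b with
      | nil =>
          simp only [List.cons_append, List.nil_append, List.cons.injEq] at h
          exact absurd (by simp [h.1]) ha
      | cons hb' b' =>
          simp only [List.cons_append, List.cons.injEq] at h
          obtain ⟨h1, h2⟩ := h
          have := ih b' s t (fun hx => ha (List.mem_cons_of_mem _ hx))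
            (fun hx => hb (List.mem_cons_of_mem _ hx)) h2
          exact ⟨by rw [h1, this.1], this.2⟩

-- a list of two or more pieces always contains the separator after joining
lemma sep_mem_join (c : Char) :
    ∀ (x y : List Char) (r : List (List Char)), c ∈ PySem.Chars.join [c] (x :: y :: r) := by
  intro x y r
  rw [PySem.Chars.join_cons_cons]
  simp

-- join with a separator char is injective on nonempty lists of separator-free pieces
lemma join_sep_inj (c : Char) :
    ∀ (l1 l2 : List (List Char)), l1 ≠ [] → l2 ≠ [] →
      (∀ x ∈ l1, c ∉ x) → (∀ x ∈ l2, c ∉ x) →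
      PySem.Chars.join [c] l1 = PySem.Chars.join [c] l2 → l1 = l2 := by
  intro l1
  induction l1 with
  | nil => intro l2 h; exact absurd rfl h
  | cons x1 r1 ih =>
      intro l2 _ h2 hf1 hf2 heq
      cases r1 with
      | nil =>
          cases l2 with
          | nil => exact absurd rfl h2
          | cons x2 r2 =>
              cases r2 with
              | nil =>
                  rw [PySem.Chars.join_singleton, PySem.Chars.join_singleton] at heq
                  rw [heq]
              | cons y2 r2' =>
                  rw [PySem.Chars.join_singleton] at heq
                  exact absurd (heq ▸ sep_mem_join c x2 y2 r2')
                    (hf1 x1 (List.mem_cons_self ..))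
      | cons y1 r1' =>
          cases l2 with
          | nil => exact absurd rfl h2
          | cons x2 r2 =>
              cases r2 with
              | nil =>
                  rw [PySem.Chars.join_singleton] at heq
                  exact absurd (heq ▸ sep_mem_join c x1 y1 r1')
                    (hf2 x2 (List.mem_cons_self ..))
              | cons y2 r2' =>
                  rw [PySem.Chars.join_cons_cons, PySem.Chars.join_cons_cons] at heq
                  simp only [List.append_assoc, List.singleton_append] at heq
                  obtain ⟨hx, hrest⟩ := append_sep_inj c _ _ _ _
                    (hf1 x1 (List.mem_cons_self ..)) (hf2 x2 (List.mem_cons_self ..)) heq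
                  have := ih (y2 :: r2') (by simp) (by simp)
                    (fun z hz => hf1 z (List.mem_cons_of_mem _ hz))
                    (fun z hz => hf2 z (List.mem_cons_of_mem _ hz))
                    hrest
                  rw [hx, this]

lemma str_join_sep_inj (l1 l2 : List String) (h1 : l1 ≠ []) (h2 : l2 ≠ [])
    (hf1 : ∀ x ∈ l1, ('\x1F' : Char) ∉ x.toList) (hf2 : ∀ x ∈ l2, ('\x1F' : Char) ∉ x.toList)
    (heq : PySem.Str.join pvSep l1 = PySem.Str.join pvSep l2) : l1 = l2 := by
  have hchars : PySem.Chars.join ("\x1F".toList) (l1.map String.toList)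
      = PySem.Chars.join ("\x1F".toList) (l2.map String.toList) := by
    have := congrArg String.toList heq
    simpa [PySem.Str.toList_join, pvSep] using this
  have : l1.map String.toList = l2.map String.toList := by
    refine join_sep_inj '\x1F' _ _ (by simpa using h1) (by simpa using h2) ?_ ?_ ?_
    · intro x hx
      obtain ⟨s, hs, rfl⟩ := List.mem_map.mp hx
      exact hf1 s hs
    · intro x hx
      obtain ⟨s, hs, rfl⟩ := List.mem_map.mp hx
      exact hf2 s hs
    · simpa using hchars
  exact List.map_injective_iff.mpr (fun a b hab => by
    simpa using congrArg String.ofList hab) this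

lemma dom_keys_sep_free (row : List (String × String)) (hdom : Dom_is_playerdata row) :
    ∀ s ∈ row.map Prod.fst, ('\x1F' : Char) ∉ s.toList := by
  intro s hs hc
  obtain ⟨⟨k, v⟩, hkv, rfl⟩ := List.mem_map.mp hs
  unfold Dom_is_playerdata at hdom
  have := (List.all_eq_true.mp hdom) _ hkv
  simp only [Bool.and_eq_true] at this
  have hk := this.1
  unfold pvDomStr at hk
  have := (List.all_eq_true.mp hk) _ hc
  simp [pvDomChar] at this

lemma alt_iff (row : List (String × String)) (hdom : Dom_is_playerdata row) :
    is_playerdata_alt row = true ↔ ∃ m ∈ pvSchemas, (row.map Prod.fst).Perm m := by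
  rw [is_playerdata_alt,
    show pvSchemaFingerprints = PySem.Set.ofList pvFpList from rfl,
    show ∀ (l : List String) (s : String), (PySem.Set.contains (PySem.Set.ofList l) s = true)
        ↔ s ∈ PySem.Set.ofList l from by simp [PySem.Set.contains],
    PySem.Set.mem_ofList, ← fp_map]
  simp only [List.mem_map]
  constructor
  · rintro ⟨m, hm, heq⟩
    refine ⟨m, hm, ?_⟩
    have hmne : PySem.List.sorted m (fun x => x) false ≠ [] := by
      intro h
      have hlen : m.length = 0 := by
        have := (PySem.List.sorted_perm m (fun x => x) false).length_eq
        rw [h] at this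
        simpa using this.symm
      exact (pvSchemas_sep_free m hm).1 (List.length_eq_zero_iff.mp hlen)
    have hkne : PySem.List.sorted (row.map Prod.fst) (fun x => x) false ≠ [] := by
      intro h
      refine pvFp_toList_ne_nil _ (fp_map ▸ List.mem_map.mpr ⟨m, hm, heq⟩) ?_
      rw [h]
      simp [PySem.Str.toList_join, PySem.Chars.join_nil]
    have hsort : PySem.List.sorted (row.map Prod.fst) (fun x => x) false
        = PySem.List.sorted m (fun x => x) false := by
      refine str_join_sep_inj _ _ hkne hmne ?_ ?_ heq.symm
      · intro x hx
        exact dom_keys_sep_free row hdom x ((PySem.List.mem_sorted ..).mp hx)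
      · intro x hx
        exact (pvSchemas_sep_free m hm).2 x ((PySem.List.mem_sorted ..).mp hx)
    exact (PySem.List.sorted_id_eq_sorted_id_iff_perm ..).mp hsort
  · rintro ⟨m, hm, hp⟩
    refine ⟨m, hm, ?_⟩
    rw [(PySem.List.sorted_id_eq_sorted_id_iff_perm (row.map Prod.fst) m).mpr hp]

-- ===== VERDICT (by name: the statement is the Claim_ definition above) =====
theorem is_playerdata_spec : Claim_equal_is_playerdata := by
  intro row hdom
  show is_playerdata row = is_playerdata_alt row
  rw [Bool.eq_iff_iff, alt_iff row hdom, is_playerdata]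
  simp only [List.any_eq_true]
  constructor
  · rintro ⟨m, hm, hmatch⟩
    exact ⟨m, hm, (is_match_iff row _ m (pvSchemas_nodup m hm)).mp hmatch⟩
  · rintro ⟨m, hm, hp⟩
    exact ⟨m, hm, (is_match_iff row _ m (pvSchemas_nodup m hm)).mpr hp⟩
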